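-- pv_equiv track=rewrite | github.com/cykelsmed/vinkeljern | prompt_engineering.py | truncate_section
-- ===== SOURCE A (Python) =====
-- def truncate_section(section: str, max_chars: int) -> str:
--     """Afkorter en sektion til max_chars med intelligent afkortning."""
--     if not section or len(section) <= max_chars:
--         return section
--
--     # Hvis det er en liste, behold så mange hele punkter som muligt
--     if section.strip().startswith('-'):
--         lines = section.strip().split('\n')
--         result = []
--         current_length = 0
--
--         for line in lines:
--             if current_length + len(line) + 1 <= max_chars:
--                 result.append(line)
--                 current_length += len(line) + 1  # +1 for newline
--             else:
--                 break
--
--         return '\n'.join(result)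
--     else:
--         # Ellers afkort til max_chars og tilføj ellipsis
--         return section[:max_chars-3] + "..."
-- ===== SOURCE B (Python) =====
-- def _keep_lines(lines, budget):
--     """Recursively join as many whole leading lines as fit in budget (len+1 each); None if none fit."""
--     if not lines or len(lines[0]) + 1 > budget:
--         return None
--     rest = _keep_lines(lines[1:], budget - len(lines[0]) - 1)
--     return lines[0] if rest is None else lines[0] + "\n" + rest
--
-- def truncate_section(section: str, max_chars: int) -> str:
--     """Afkorter en sektion til max_chars med intelligent afkortning."""
--     if not section or len(section) <= max_chars:
--         return section
--     stripped = section.strip()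
--     if not stripped.startswith('-'):
--         return section[:max_chars-3] + "..."
--     kept = _keep_lines(stripped.split('\n'), max_chars)
--     return kept if kept is not None else ""
-- ===== Notes on version B (the rewrite author's own statement) =====
-- stated objective: alternative
-- what changed: The list branch is replaced by a recursive budget-subtracting helper that builds the truncated string directly while returning (an Option marks 'nothing fits'), instead of A's stateful running-sum loop that accumulates a list of lines and joins it afterwards.
import Mathlib
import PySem

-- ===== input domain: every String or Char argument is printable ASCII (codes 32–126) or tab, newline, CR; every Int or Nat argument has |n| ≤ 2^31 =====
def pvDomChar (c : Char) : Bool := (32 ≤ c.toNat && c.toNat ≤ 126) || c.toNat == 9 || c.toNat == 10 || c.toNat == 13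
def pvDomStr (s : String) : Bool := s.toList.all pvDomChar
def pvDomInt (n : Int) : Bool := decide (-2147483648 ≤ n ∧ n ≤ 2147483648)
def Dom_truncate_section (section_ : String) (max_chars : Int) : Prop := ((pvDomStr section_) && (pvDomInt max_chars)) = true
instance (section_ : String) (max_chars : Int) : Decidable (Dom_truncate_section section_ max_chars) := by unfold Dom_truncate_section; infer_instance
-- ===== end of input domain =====

-- B replaces A's running-sum loop (accumulate kept lines, join at the end) by a recursive
-- budget-subtracting helper that builds the joined string directly (alternative decomposition, same cost).

-- ===== PORT A =====
-- A's for-loop with running length and early break, as structural recursion over the lines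
def pvTakeA (lines : List String) (current_length : Int) (max_chars : Int) : List String :=
  match lines with
  | [] => []
  | line :: rest =>
    if current_length + PySem.Str.len line + 1 ≤ max_chars then
      line :: pvTakeA rest (current_length + PySem.Str.len line + 1) max_chars
    else []

def truncate_section (section_ : String) (max_chars : Int) : String :=
  if section_ = "" ∨ PySem.Str.len section_ ≤ max_chars then section_
  else if PySem.Str.startswith (PySem.Str.strip section_) "-" then
    let lines := (PySem.Chars.splitOn (PySem.Str.strip section_).toList "\n".toList).map String.ofList
    PySem.Str.join "\n" (pvTakeA lines 0 max_chars)
  else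
    PySem.Str.slice section_ none (some (max_chars - 3)) ++ "..."

-- ===== PORT B =====
-- Source B's _keep_lines: recursion subtracting from the budget, gluing the string on the way back up
def pvKeepLines (lines : List String) (budget : Int) : Option String :=
  match lines with
  | [] => none
  | line :: rest =>
    if PySem.Str.len line + 1 > budget then none
    else
      match pvKeepLines rest (budget - PySem.Str.len line - 1) with
      | none => some line
      | some r => some (line ++ "\n" ++ r)

def truncate_section_alt (section_ : String) (max_chars : Int) : String :=
  if section_ = "" ∨ PySem.Str.len section_ ≤ max_chars then section_
  else
    let stripped := PySem.Str.strip section_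
    if ¬ PySem.Str.startswith stripped "-" then
      PySem.Str.slice section_ none (some (max_chars - 3)) ++ "..."
    else
      match pvKeepLines ((PySem.Chars.splitOn stripped.toList "\n".toList).map String.ofList) max_chars with
      | some kept => kept
      | none => ""

-- ===== PRECONDITION & SPEC =====
def Spec_truncate_section (section_ : String) (max_chars : Int) (out : String) : Prop := out = truncate_section_alt section_ max_chars
instance (section_ : String) (max_chars : Int) (out : String) : Decidable (Spec_truncate_section section_ max_chars out) := by unfold Spec_truncate_section; infer_instance

-- ===== CLAIM (what is proved, stated in full; the proofs are below) =====
def Claim_equal_truncate_section : Prop := ∀ (section_ : String) (max_chars : Int), Dom_truncate_section section_ max_chars → Spec_truncate_section section_ max_chars (truncate_section section_ max_chars)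

-- ===== LEMMAS AND PROOFS =====

lemma pv_join_singleton (x : String) : PySem.Str.join "\n" [x] = x := by
  simp [PySem.Str.join, PySem.Chars.join_singleton]

lemma pv_join_cons_cons (a b : String) (ts : List String) :
    PySem.Str.join "\n" (a :: b :: ts) = a ++ "\n" ++ PySem.Str.join "\n" (b :: ts) := by
  apply String.toList_inj.mp
  simp [PySem.Str.join, PySem.Chars.join_cons_cons]

-- B's helper returns none exactly when A's loop keeps nothing
lemma pv_keep_none_iff (ls : List String) (c m : Int) :
    pvKeepLines ls (m - c) = none ↔ pvTakeA ls c m = [] := by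
  cases ls with
  | nil => simp [pvKeepLines, pvTakeA]
  | cons line rest =>
    simp only [pvKeepLines, pvTakeA]
    by_cases h : PySem.Str.len line + 1 > m - c
    · rw [if_pos h, if_neg (show ¬ c + PySem.Str.len line + 1 ≤ m by omega)]; simp
    · rw [if_neg h, if_pos (show c + PySem.Str.len line + 1 ≤ m by omega)]
      constructor
      · intro hc; exfalso; revert hc
        cases pvKeepLines rest (m - c - PySem.Str.len line - 1) <;> simp
      · intro hc; exact absurd hc (List.cons_ne_nil _ _)

-- A's accumulate-then-join equals B's direct recursive construction, for any start total
lemma pv_take_eq_keep (ls : List String) (c m : Int) :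
    PySem.Str.join "\n" (pvTakeA ls c m) = (pvKeepLines ls (m - c)).getD "" := by
  induction ls generalizing c with
  | nil => rfl
  | cons line rest ih =>
    simp only [pvTakeA, pvKeepLines]
    by_cases h : PySem.Str.len line + 1 > m - c
    · rw [if_pos h, if_neg (show ¬ c + PySem.Str.len line + 1 ≤ m by omega)]; rfl
    · rw [if_neg h, if_pos (show c + PySem.Str.len line + 1 ≤ m by omega)]
      have harg : m - c - PySem.Str.len line - 1 = m - (c + PySem.Str.len line + 1) := by ring
      rw [harg]
      cases hk : pvKeepLines rest (m - (c + PySem.Str.len line + 1)) with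
      | none =>
        have hnil : pvTakeA rest (c + PySem.Str.len line + 1) m = [] :=
          (pv_keep_none_iff rest (c + PySem.Str.len line + 1) m).mp hk
        rw [hnil]
        exact pv_join_singleton line
      | some r =>
        have htail := ih (c + PySem.Str.len line + 1)
        rw [hk] at htail
        have hne : pvTakeA rest (c + PySem.Str.len line + 1) m ≠ [] := by
          intro hnil
          rw [(pv_keep_none_iff rest (c + PySem.Str.len line + 1) m).mpr hnil] at hk
          cases hk
        obtain ⟨t, ts, hts⟩ := List.exists_cons_of_ne_nil hne
        rw [hts] at htail ⊢
        simp only [Option.getD_some] at htail ⊢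
        rw [pv_join_cons_cons, htail]

-- ===== VERDICT (by name: the statement is the Claim_ definition above) =====
theorem truncate_section_spec : Claim_equal_truncate_section := by
  intro section_ max_chars _
  unfold Spec_truncate_section
  simp only [truncate_section, truncate_section_alt]
  by_cases h1 : section_ = "" ∨ PySem.Str.len section_ ≤ max_chars
  · rw [if_pos h1, if_pos h1]
  · rw [if_neg h1, if_neg h1]
    by_cases h2 : PySem.Str.startswith (PySem.Str.strip section_) "-" = true
    · rw [if_pos, if_neg]
      · have h := pv_take_eq_keep
          ((PySem.Chars.splitOn (PySem.Str.strip section_).toList "\n".toList).map String.ofList) 0 max_chars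
        rw [show max_chars - 0 = max_chars from by ring] at h
        rw [h]
        cases pvKeepLines ((PySem.Chars.splitOn (PySem.Str.strip section_).toList "\n".toList).map String.ofList) max_chars <;> rfl
      · simpa using h2
      · simpa using h2
    · rw [if_neg, if_pos]
      · simpa using h2
      · simpa using h2
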